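-- pv_equiv track=rewrite | github.com/Tobiaschni/Allistone-Homework | code_segmentation/capillaries_detection.py | split_tuples_gros
-- ===== SOURCE A (Python) =====
-- def split_tuples_gros(tuple_list, area_list, threshold):
--     marked_for_splitting = set()
--
--     for idx, tup in enumerate(tuple_list):
--         areas_above_threshold = [area_list[i - 1] for i in tup if area_list[i - 1] > threshold]
--         if len(areas_above_threshold) >= 2:
--             marked_for_splitting.add(idx)
--
--
--     result_list = []
--
--     for idx, tup in enumerate(tuple_list):
--         if idx in marked_for_splitting:
--           for i in tup:
--             result_list.append((i,))
--         else:
--             result_list.append(tup)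
--
--
--     return result_list
-- ===== SOURCE B (Python) =====
-- def split_tuples_gros(tuple_list, area_list, threshold):
--     # One fused pass: count up to two above-threshold areas per tuple, then emit.
--     result_list = []
--     for tup in tuple_list:
--         hits = 0
--         for i in tup:
--             if area_list[i - 1] > threshold:
--                 hits += 1
--                 if hits == 2:
--                     break
--         if hits >= 2:
--             result_list.extend((j,) for j in tup)
--         else:
--             result_list.append(tup)
--     return result_list
-- ===== Notes on version B (the rewrite author's own statement) =====
-- stated objective: simpler
-- what changed: Single fused pass over tuple_list that short-circuits the per-tuple count at two hits and emits immediately, instead of building a marked_for_splitting index set in one pass and consuming it in a second pass.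
import Mathlib
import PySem

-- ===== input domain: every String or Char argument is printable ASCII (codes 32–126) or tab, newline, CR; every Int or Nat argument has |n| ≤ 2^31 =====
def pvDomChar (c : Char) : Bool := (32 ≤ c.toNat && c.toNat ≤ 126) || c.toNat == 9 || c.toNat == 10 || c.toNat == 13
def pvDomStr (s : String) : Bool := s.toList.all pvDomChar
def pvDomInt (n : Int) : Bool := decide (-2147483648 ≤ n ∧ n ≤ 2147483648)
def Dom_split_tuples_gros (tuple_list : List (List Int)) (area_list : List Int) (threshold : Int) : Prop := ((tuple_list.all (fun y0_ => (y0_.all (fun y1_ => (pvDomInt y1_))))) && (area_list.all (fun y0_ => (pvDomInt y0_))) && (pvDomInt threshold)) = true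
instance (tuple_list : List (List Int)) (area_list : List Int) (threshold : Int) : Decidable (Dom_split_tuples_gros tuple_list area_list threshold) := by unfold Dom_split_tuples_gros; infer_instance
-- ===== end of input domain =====

-- B fuses A's mark-then-split two-pass structure into one pass with a short-circuited per-tuple hit counter (objective: simpler).


-- ===== PORT A =====
-- [area_list[i-1] for i in tup if area_list[i-1] > threshold]  (pyGetD is exact under Pre_)
def pvAbove (area_list : List Int) (threshold : Int) (tup : List Int) : List Int :=
  tup.filterMap (fun i =>
    if PySem.List.pyGetD area_list (i - 1) 0 > threshold
    then some (PySem.List.pyGetD area_list (i - 1) 0) else none)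

-- pass 1: marked_for_splitting = set of indices with ≥ 2 areas above threshold
def pvMarked (area_list : List Int) (threshold : Int) (tuple_list : List (List Int)) : PySem.Set Int :=
  (PySem.List.enumerate tuple_list 0).foldl
    (fun s p => if 2 ≤ (pvAbove area_list threshold p.2).length then PySem.Set.add s p.1 else s)
    PySem.Set.empty

def split_tuples_gros (tuple_list : List (List Int)) (area_list : List Int) (threshold : Int) : List (List Int) :=
  -- pass 2: split the marked tuples into singletons
  (PySem.List.enumerate tuple_list 0).foldl
    (fun res p =>
      if PySem.Set.contains (pvMarked area_list threshold tuple_list) p.1 then res ++ p.2.map (fun i => [i])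
      else res ++ [p.2]) []

-- ===== PORT B =====
-- per-tuple hit counter, short-circuiting (break) once it reaches 2
def pvHits (area_list : List Int) (threshold : Int) : List Int → Nat → Nat
  | [], hits => hits
  | i :: rest, hits =>
    if PySem.List.pyGetD area_list (i - 1) 0 > threshold then
      if hits + 1 == 2 then 2
      else pvHits area_list threshold rest (hits + 1)
    else pvHits area_list threshold rest hits

def split_tuples_gros_alt (tuple_list : List (List Int)) (area_list : List Int) (threshold : Int) : List (List Int) :=
  tuple_list.foldl
    (fun res tup =>
      if 2 ≤ pvHits area_list threshold tup 0 then res ++ tup.map (fun j => [j])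
      else res ++ [tup]) []

-- ===== PRECONDITION & SPEC =====
-- Pre_: exactly the inputs where A's area_list[i-1] never raises IndexError (Python wraps negative indices).
def Pre_split_tuples_gros (tuple_list : List (List Int)) (area_list : List Int) (threshold : Int) : Prop :=
  ∀ tup ∈ tuple_list, ∀ i ∈ tup, PySem.Raise.InRange area_list.length (i - 1)
instance (tuple_list : List (List Int)) (area_list : List Int) (threshold : Int) : Decidable (Pre_split_tuples_gros tuple_list area_list threshold) := by unfold Pre_split_tuples_gros; infer_instance
def pvWitness_split_tuples_gros : List (List Int) × List Int × Int := ([[1, 2], [2], [0, 1]], [5, 10], 3)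

def Spec_split_tuples_gros (tuple_list : List (List Int)) (area_list : List Int) (threshold : Int) (out : List (List Int)) : Prop := out = split_tuples_gros_alt tuple_list area_list threshold
instance (tuple_list : List (List Int)) (area_list : List Int) (threshold : Int) (out : List (List Int)) : Decidable (Spec_split_tuples_gros tuple_list area_list threshold out) := by unfold Spec_split_tuples_gros; infer_instance

-- ===== CLAIM (what is proved, stated in full; the proofs are below) =====
def Claim_equal_split_tuples_gros : Prop := ∀ (tuple_list : List (List Int)) (area_list : List Int) (threshold : Int), Dom_split_tuples_gros tuple_list area_list threshold → Pre_split_tuples_gros tuple_list area_list threshold → Spec_split_tuples_gros tuple_list area_list threshold (split_tuples_gros tuple_list area_list threshold)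

-- ===== LEMMAS AND PROOFS =====

-- the per-tuple condition both programs decide
def pvCnt (area_list : List Int) (threshold : Int) (tup : List Int) : Nat :=
  tup.countP (fun i => decide (PySem.List.pyGetD area_list (i - 1) 0 > threshold))

theorem pvAbove_length (area_list : List Int) (threshold : Int) (tup : List Int) :
    (pvAbove area_list threshold tup).length = pvCnt area_list threshold tup := by
  induction tup with
  | nil => rfl
  | cons i rest ih =>
    simp only [pvAbove, pvCnt, List.filterMap_cons, List.countP_cons] at *
    by_cases h : PySem.List.pyGetD area_list (i - 1) 0 > threshold <;> simp [h, ih]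

theorem pvHits_eq (area_list : List Int) (threshold : Int) (tup : List Int) :
    ∀ hits : Nat, hits < 2 →
      pvHits area_list threshold tup hits = min 2 (hits + pvCnt area_list threshold tup) := by
  induction tup with
  | nil => intro hits h; simp [pvHits, pvCnt]; omega
  | cons i rest ih =>
    intro hits h
    by_cases h1 : PySem.List.pyGetD area_list (i - 1) 0 > threshold
    · by_cases h2 : hits + 1 = 2
      · simp [pvHits, pvCnt, h1, h2]
        omega
      · simp only [pvHits, pvCnt, List.countP_cons, h1, decide_true, beq_iff_eq, if_true,
          if_neg h2]
        rw [ih (hits + 1) (by omega)]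
        simp only [pvCnt]; omega
    · simp only [pvHits, pvCnt, List.countP_cons, h1, decide_false, if_false, Bool.false_eq_true]
      rw [ih hits h]
      simp only [pvCnt]
      omega

theorem pvHits_iff (area_list : List Int) (threshold : Int) (tup : List Int) :
    (2 ≤ pvHits area_list threshold tup 0) ↔ 2 ≤ pvCnt area_list threshold tup := by
  rw [pvHits_eq area_list threshold tup 0 (by omega)]; omega

-- pass 1 of A computes exactly the (ordered) list of indices of tuples satisfying the condition
theorem pvMarked_eq (area_list : List Int) (threshold : Int) :
    ∀ (l : List (List Int)) (s : Int) (acc : List Int), (∀ x ∈ acc, x < s) →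
      (PySem.List.enumerate l s).foldl
        (fun st p => if 2 ≤ (pvAbove area_list threshold p.2).length then PySem.Set.add st p.1 else st)
        acc
      = acc ++ ((PySem.List.enumerate l s).filter
          (fun q => decide (2 ≤ (pvAbove area_list threshold q.2).length))).map (·.1) := by
  intro l
  induction l with
  | nil => intro s acc _; simp [PySem.List.enumerate]
  | cons x xs ih =>
    intro s acc hacc
    rw [PySem.List.enumerate_cons]
    simp only [List.foldl_cons, List.filter_cons]
    by_cases hc : 2 ≤ (pvAbove area_list threshold x).length
    · have hadd : PySem.Set.add acc s = acc ++ [s] :=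
        PySem.Set.add_of_not_mem (fun hmem => absurd (hacc s hmem) (lt_irrefl s))
      rw [if_pos hc, hadd, ih (s + 1) (acc ++ [s])
          (by intro y hy; rcases List.mem_append.mp hy with h | h
              · exact lt_trans (hacc y h) (by omega)
              · simp at h; omega)]
      simp [hc, List.append_assoc]
    · rw [if_neg hc, ih (s + 1) acc (by intro y hy; exact lt_trans (hacc y hy) (by omega))]
      simp [hc]

-- ===== VERDICT =====
theorem split_tuples_gros_spec : Claim_equal_split_tuples_gros := by
  intro tl al th _ _
  unfold Spec_split_tuples_gros split_tuples_gros split_tuples_gros_alt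
  have hm : pvMarked al th tl = ((PySem.List.enumerate tl 0).filter
      (fun q => decide (2 ≤ (pvAbove al th q.2).length))).map (·.1) := by
    unfold pvMarked
    rw [show (PySem.Set.empty : PySem.Set Int) = ([] : List Int) from rfl,
      pvMarked_eq al th tl 0 [] (by intro x h; cases h)]
    simp
  rw [hm]
  -- rewrite pass 2's membership test into B's per-tuple condition, for members of enumerate
  have hcongr :
      (PySem.List.enumerate tl 0).foldl
        (fun res p =>
          if PySem.Set.contains
              (((PySem.List.enumerate tl 0).filter
                (fun q => decide (2 ≤ (pvAbove al th q.2).length))).map (·.1)) p.1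
          then res ++ p.2.map (fun i => [i]) else res ++ [p.2]) []
      = (PySem.List.enumerate tl 0).foldl
        (fun res (p : Int × List Int) =>
          if 2 ≤ pvHits al th p.2 0 then res ++ p.2.map (fun i => [i]) else res ++ [p.2]) [] := by
    apply PySem.List.foldl_congr_mem
    intro acc p hp
    have hmem : PySem.Set.contains
        (((PySem.List.enumerate tl 0).filter
          (fun q => decide (2 ≤ (pvAbove al th q.2).length))).map (·.1)) p.1
        = decide (2 ≤ pvHits al th p.2 0) := by
      rcases (PySem.List.mem_enumerate_iff _ _ _).mp hp with ⟨k, hk, hpk⟩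
      by_cases hcond : 2 ≤ pvHits al th p.2 0
      · have hc2 : 2 ≤ (pvAbove al th p.2).length := by
          rw [pvAbove_length]; exact (pvHits_iff al th p.2).mp hcond
        have : p.1 ∈ ((PySem.List.enumerate tl 0).filter
            (fun q => decide (2 ≤ (pvAbove al th q.2).length))).map (·.1) :=
          List.mem_map.mpr ⟨p, List.mem_filter.mpr ⟨hp, by simpa using hc2⟩, rfl⟩
        rw [(PySem.Set.contains_iff _ _).mpr this]
        simp [hcond]
      · have hnot : p.1 ∉ ((PySem.List.enumerate tl 0).filter
            (fun q => decide (2 ≤ (pvAbove al th q.2).length))).map (·.1) := by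
          intro hmem'
          rcases List.mem_map.mp hmem' with ⟨q, hq, hq1⟩
          rcases List.mem_filter.mp hq with ⟨hqe, hqc⟩
          rcases (PySem.List.mem_enumerate_iff _ _ _).mp hqe with ⟨k', hk', hqk⟩
          -- same index ⇒ same position ⇒ same tuple
          have hkk : k' = k := by
            have h1 := hq1
            rw [hqk, hpk] at h1
            simp at h1
            omega
          have hq2 : q.2 = p.2 := by rw [hqk, hpk]; simp [hkk]
          apply hcond
          rw [pvHits_iff, ← pvAbove_length]
          simpa [hq2] using hqc
        have hcf : PySem.Set.contains
            (((PySem.List.enumerate tl 0).filter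
              (fun q => decide (2 ≤ (pvAbove al th q.2).length))).map (·.1)) p.1 = false := by
          rcases Bool.eq_false_or_eq_true (PySem.Set.contains
            (((PySem.List.enumerate tl 0).filter
              (fun q => decide (2 ≤ (pvAbove al th q.2).length))).map (·.1)) p.1) with h | h
          · exact absurd ((PySem.Set.contains_iff _ _).mp h) hnot
          · exact h
        rw [hcf]
        simp [hcond]
    rw [hmem]
    by_cases hcond : 2 ≤ pvHits al th p.2 0 <;> simp [hcond]
  rw [hcongr]
  -- pass 2 now only looks at p.2; fold over enumerate = fold over the list itself
  conv_rhs => rw [← PySem.List.map_snd_enumerate tl (0 : Int)]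
  rw [List.foldl_map]
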